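-- pv_equiv track=rewrite | github.com/Ghoreish/usaco | beads/beads.py | left1
-- ===== SOURCE A (Python) =====
-- def left1(x):
--     l="begin"
--     n=0
--     for i in x:
--         if i==l or l=="begin":
--             n+=1
--         else:
--             break
--         l=i
--     return n
-- ===== SOURCE B (Python) =====
-- def left1(x):
--     # length of the leading run = total length minus what is left after
--     # stripping all leading copies of the first element
--     if not x:
--         return 0
--     return len(x) - len(x.lstrip(x[0]))
-- ===== Notes on version B (the rewrite author's own statement) =====
-- stated objective: faster
-- what changed: Instead of A's sentinel-tracking counting loop, B computes the run length arithmetically as len(x) minus the length of x with its leading copies of x[0] stripped (str.lstrip), with no explicit Python-level loop or counter.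
import Mathlib
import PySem

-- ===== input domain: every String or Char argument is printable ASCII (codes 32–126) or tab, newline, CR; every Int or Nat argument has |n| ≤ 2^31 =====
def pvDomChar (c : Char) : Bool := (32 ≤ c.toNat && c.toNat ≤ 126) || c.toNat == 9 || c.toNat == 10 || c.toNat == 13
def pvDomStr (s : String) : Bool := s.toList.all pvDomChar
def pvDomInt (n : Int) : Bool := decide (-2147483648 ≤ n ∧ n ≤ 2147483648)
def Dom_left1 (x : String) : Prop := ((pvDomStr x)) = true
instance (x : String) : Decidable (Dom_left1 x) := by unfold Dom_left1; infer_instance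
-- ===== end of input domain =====

-- B replaces A's sentinel-tracking counting loop by arithmetic on lengths:
-- len(x) - len(x.lstrip(x[0])); return value only, no side effects.

-- ===== PORT A =====
-- A's loop over the characters: state is the previous element l (a string; initially "begin")
-- and the counter n; 'break' is modelled by returning n.
def left1Loop (cs : List Char) (l : String) (n : Int) : Int :=
  match cs with
  | [] => n
  | i :: rest =>
    if String.ofList [i] == l || l == "begin" then left1Loop rest (String.ofList [i]) (n + 1)
    else n

def left1 (x : String) : Int := left1Loop x.toList "begin" 0

-- ===== PORT B =====
-- x.lstrip(ch) for the one-character string ch = x[0]: drop the leading characters that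
-- belong to the set {c} (hand port of lstrip with a chars argument; exact here since the
-- argument is the single character c).
def lstripChar (cs : List Char) (c : Char) : List Char :=
  cs.dropWhile (fun d => d == c)

def left1_alt (x : String) : Int :=
  match x.toList with
  | [] => 0
  | c :: _ => (x.toList.length : Int) - ((lstripChar x.toList c).length : Int)

-- ===== PRECONDITION & SPEC =====
def Spec_left1 (x : String) (out : Int) : Prop := out = left1_alt x
instance (x : String) (out : Int) : Decidable (Spec_left1 x out) := by unfold Spec_left1; infer_instance

-- ===== CLAIM =====
def Claim_equal_left1 : Prop := ∀ (x : String), Dom_left1 x → Spec_left1 x (left1 x)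

-- ===== LEMMAS AND PROOFS =====

theorem singleton_ne_begin (c : Char) : (String.ofList [c] == "begin") = false := by
  apply beq_eq_false_iff_ne.mpr
  intro h
  have := congrArg String.toList h
  simp at this

theorem mk_beq_mk (i c : Char) : (String.ofList [i] == String.ofList [c]) = (i == c) := by
  by_cases h : i = c
  · subst h; simp
  · have h1 : (String.ofList [i] == String.ofList [c]) = false := by
      apply beq_eq_false_iff_ne.mpr
      intro he
      have := congrArg String.toList he
      simp at this
      exact h this
    simp [h1, beq_eq_false_iff_ne.mpr h]

theorem left1Loop_run (c : Char) (rest : List Char) (n : Int) :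
    left1Loop rest (String.ofList [c]) n = n + ((rest.takeWhile (fun d => d == c)).length : Int) := by
  induction rest generalizing c n with
  | nil => simp [left1Loop]
  | cons i r ih =>
    by_cases h : i = c
    · subst h
      simp [left1Loop, List.takeWhile, singleton_ne_begin, ih i]
      ring
    · have hb : (i == c) = false := beq_eq_false_iff_ne.mpr h
      simp [left1Loop, List.takeWhile, singleton_ne_begin, mk_beq_mk, hb]

theorem take_drop_length (p : Char → Bool) (l : List Char) :
    (l.takeWhile p).length + (l.dropWhile p).length = l.length := by
  rw [← List.length_append, List.takeWhile_append_dropWhile]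

-- ===== VERDICT =====
theorem left1_spec : Claim_equal_left1 := by
  intro x _
  unfold Spec_left1 left1 left1_alt lstripChar
  cases h : x.toList with
  | nil => simp [left1Loop]
  | cons c rest =>
    have hlen := take_drop_length (fun d => d == c) (c :: rest)
    simp [List.takeWhile, List.dropWhile] at hlen
    simp [left1Loop, left1Loop_run c rest 1, List.dropWhile]
    omega
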